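-- pv_equiv track=rewrite | github.com/hpcaitech/ColossalAI | applications/ColossalChat/coati/dataset/utils.py | find_subsequences_that_concatenate_to_target_string
-- ===== SOURCE A (Python) =====
-- from typing import Any, Dict, List, Tuple, Union
--
-- def find_subsequences_that_concatenate_to_target_string(sequence: List[str], target: str, depth: int=20) -> Tuple[int, int]:
--     """
--     Args:
--         target: a string
--     Returns:
--         start end index of the subsequence
--     """
--     sequence = [s.replace(' ','') for s in sequence]
--     target = target.replace(' ','')
--     all_occurances = []
--     for i in range(len(sequence)):
--         for j in range(i+1, min(len(sequence), i+depth)):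
--             if ''.join(sequence[i:j]) == target:
--                 all_occurances.append([i, j])
--     return all_occurances
-- ===== SOURCE B (Python) =====
-- def find_subsequences_that_concatenate_to_target_string(sequence, target, depth=20):
--     cleaned = [s.replace(' ', '') for s in sequence]
--     target = target.replace(' ', '')
--     n = len(cleaned)
--     # prefixes[k] = concatenation of the first k cleaned elements
--     prefixes = ['']
--     running = ''
--     for s in cleaned:
--         running += s
--         prefixes.append(running)
--     # bucket the prefix indices by prefix value
--     buckets = {}
--     for j, p in enumerate(prefixes):
--         buckets[p] = buckets.get(p, []) + [j]
--     # join(cleaned[i:j]) == target  iff  prefixes[j] == prefixes[i] + target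
--     result = []
--     for i in range(n):
--         for j in buckets.get(prefixes[i] + target, []):
--             if i < j < min(n, i + depth):
--                 result.append([i, j])
--     return result
-- ===== Notes on version B (the rewrite author's own statement) =====
-- stated objective: alternative
-- what changed: Replaces the nested re-join scan (joining sequence[i:j] for every pair) by precomputed cumulative prefix strings bucketed in a dict keyed by prefix value, using join(sequence[i:j])==target iff prefix[j]==prefix[i]+target; each start i then only looks up the bucket of prefix[i]+target.
import Mathlib
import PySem

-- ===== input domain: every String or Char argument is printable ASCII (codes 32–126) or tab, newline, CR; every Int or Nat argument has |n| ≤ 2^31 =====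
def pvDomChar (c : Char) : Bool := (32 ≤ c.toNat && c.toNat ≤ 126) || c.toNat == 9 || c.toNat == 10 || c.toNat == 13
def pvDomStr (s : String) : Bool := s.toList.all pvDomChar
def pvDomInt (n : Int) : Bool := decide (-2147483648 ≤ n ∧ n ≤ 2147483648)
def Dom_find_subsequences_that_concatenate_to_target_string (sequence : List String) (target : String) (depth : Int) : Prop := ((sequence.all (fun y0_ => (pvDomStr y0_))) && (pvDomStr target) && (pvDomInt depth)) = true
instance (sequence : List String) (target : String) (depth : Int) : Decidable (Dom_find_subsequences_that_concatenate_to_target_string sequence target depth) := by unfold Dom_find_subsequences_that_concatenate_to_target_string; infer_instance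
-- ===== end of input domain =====

-- B replaces A's per-pair re-join scan by precomputed prefix strings bucketed in a dict
-- (join(seq[i:j]) == target  iff  prefix[j] == prefix[i] + target); same return value.

-- ===== PORT A =====
def find_subsequences_that_concatenate_to_target_string (sequence : List String) (target : String) (depth : Int) : List (List Int) :=
  let seq := sequence.map (fun s => PySem.Str.replace s " " "")
  let tgt := PySem.Str.replace target " " ""
  (PySem.List.pyRange 0 (PySem.List.len seq) 1).foldl (fun acc i =>
    (PySem.List.pyRange (i + 1) (min (PySem.List.len seq) (i + depth)) 1).foldl (fun acc2 j =>
      if PySem.Str.join "" (PySem.List.slice seq (some i) (some j)) == tgt then acc2 ++ [[i, j]]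
      else acc2) acc) []

-- ===== PORT B =====
def find_subsequences_that_concatenate_to_target_string_alt (sequence : List String) (target : String) (depth : Int) : List (List Int) :=
  let cleaned := sequence.map (fun s => PySem.Str.replace s " " "")
  let tgt := PySem.Str.replace target " " ""
  let n : Int := PySem.List.len cleaned
  -- prefixes[k] = concatenation of the first k cleaned elements ('running += s; prefixes.append(running)')
  let prefixes := (cleaned.foldl (fun (st : List String × String) s =>
      (st.1 ++ [st.2 ++ s], st.2 ++ s)) ([""], "")).1
  -- buckets[p] = buckets.get(p, []) + [j]  for (j, p) in enumerate(prefixes)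
  let buckets := (PySem.List.enumerate prefixes).foldl
      (fun d jp => d.modify jp.2 [] (fun l => l ++ [jp.1])) PySem.Dict.empty
  (PySem.List.pyRange 0 n 1).foldl (fun acc i =>
    (buckets.getD (PySem.List.pyGetD prefixes i "" ++ tgt) []).foldl (fun acc2 j =>
      if i < j ∧ j < min n (i + depth) then acc2 ++ [[i, j]] else acc2) acc) []

-- ===== PRECONDITION & SPEC =====
def Spec_find_subsequences_that_concatenate_to_target_string (sequence : List String) (target : String) (depth : Int) (out : List (List Int)) : Prop := out = find_subsequences_that_concatenate_to_target_string_alt sequence target depth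
instance (sequence : List String) (target : String) (depth : Int) (out : List (List Int)) : Decidable (Spec_find_subsequences_that_concatenate_to_target_string sequence target depth out) := by unfold Spec_find_subsequences_that_concatenate_to_target_string; infer_instance

-- ===== CLAIM (what is proved, stated in full; the proofs are below) =====
def Claim_equal_find_subsequences_that_concatenate_to_target_string : Prop := ∀ (sequence : List String) (target : String) (depth : Int), Dom_find_subsequences_that_concatenate_to_target_string sequence target depth → Spec_find_subsequences_that_concatenate_to_target_string sequence target depth (find_subsequences_that_concatenate_to_target_string sequence target depth)

-- ===== LEMMAS AND PROOFS =====

/-- The characters of the concatenation of a list of strings. -/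
def pvCat (l : List String) : List Char := (l.map String.toList).flatten

/-- The concatenation of the first `k` elements of `cs`. -/
def pvPref (cs : List String) (k : Nat) : String := String.ofList (pvCat (cs.take k))

/-- The list of all prefix concatenations `pvPref cs 0, …, pvPref cs cs.length`. -/
def pvPrefixes (cs : List String) : List String := (List.range (cs.length + 1)).map (pvPref cs)

lemma pvCat_nil : pvCat [] = [] := rfl

lemma pvCat_cons (s : String) (t : List String) : pvCat (s :: t) = s.toList ++ pvCat t := by
  simp [pvCat]

lemma pv_ofList_pvCat_cons (s : String) (t : List String) :
    String.ofList (pvCat (s :: t)) = s ++ String.ofList (pvCat t) := by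
  rw [pvCat_cons, String.ofList_append, String.ofList_toList]

lemma pv_join_flatten (parts : List (List Char)) :
    PySem.Chars.join [] parts = parts.flatten := by
  induction parts with
  | nil => simp [PySem.Chars.join_nil]
  | cons a t ih =>
    cases t with
    | nil => simp [PySem.Chars.join_singleton]
    | cons b u =>
      rw [PySem.Chars.join_cons_cons]
      simp only [List.flatten_cons] at ih ⊢
      rw [ih]
      simp

lemma pv_join_eq (l : List String) : PySem.Str.join "" l = String.ofList (pvCat l) := by
  rw [← String.toList_inj, PySem.Str.toList_join, String.toList_empty, pv_join_flatten,
    String.toList_ofList]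
  rfl

lemma pvCat_append (l1 l2 : List String) : pvCat (l1 ++ l2) = pvCat l1 ++ pvCat l2 := by
  simp [pvCat]

lemma pvCat_take_split (cs : List String) {a b : Nat} (h : a ≤ b) :
    pvCat (cs.take b) = pvCat (cs.take a) ++ pvCat (List.take (b - a) (List.drop a cs)) := by
  conv_lhs => rw [show b = a + (b - a) by omega]
  rw [List.take_add, pvCat_append]

lemma pv_beq_congr {x y z w : String} (h : x = y ↔ z = w) : (x == y) = (z == w) := by
  by_cases hx : x = y
  · simp [hx, h.mp hx]
  · have hz : ¬ z = w := fun hzw => hx (h.mpr hzw)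
    simp [hx, hz]

lemma pv_cond_eq (cs : List String) (tgt : String) {i j : Int} (h0 : 0 ≤ i) (hij : i < j) :
    (PySem.Str.join "" (PySem.List.slice cs (some i) (some j)) == tgt)
      = (pvPref cs j.toNat == pvPref cs i.toNat ++ tgt) := by
  have h0j : 0 ≤ j := by omega
  rw [PySem.List.slice_toNat cs h0 h0j, pv_join_eq]
  apply pv_beq_congr
  have hsplit := pvCat_take_split cs (a := i.toNat) (b := j.toNat) (by omega)
  constructor
  · intro hx
    simp only [pvPref, ← String.toList_inj, String.toList_append, String.toList_ofList, hsplit]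
    rw [← hx]
    simp [String.toList_ofList]
  · intro hx
    simp only [pvPref, ← String.toList_inj, String.toList_append, String.toList_ofList,
      hsplit] at hx
    rw [← String.toList_inj, String.toList_ofList]
    exact List.append_cancel_left hx

lemma pv_prefix_fold (l : List String) (ps : List String) (r : String) :
    l.foldl (fun (st : List String × String) s => (st.1 ++ [st.2 ++ s], st.2 ++ s)) (ps, r)
      = (ps ++ (List.range l.length).map (fun k => r ++ String.ofList (pvCat (l.take (k + 1)))),
         r ++ String.ofList (pvCat l)) := by
  induction l generalizing ps r with
  | nil => simp [pvCat_nil, String.append_empty]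
  | cons s t ih =>
    simp only [List.foldl_cons]
    rw [ih]
    refine Prod.ext ?_ ?_
    · simp only [List.length_cons, List.range_succ_eq_map, List.map_cons, List.map_map]
      rw [List.append_assoc]
      congr 1
      have hhd : r ++ String.ofList (pvCat ((s :: t).take (0 + 1))) = r ++ s := by
        simp [pvCat, String.ofList_toList]
      rw [hhd]
      simp only [List.singleton_append, List.cons.injEq]
      refine ⟨by trivial, List.map_congr_left ?_⟩
      intro k _
      simp only [Function.comp]
      rw [show (s :: t).take (Nat.succ k + 1) = s :: t.take (k + 1) from rfl,
        pv_ofList_pvCat_cons, ← String.append_assoc]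
    · simp only [pv_ofList_pvCat_cons, ← String.append_assoc]

lemma pv_prefixes_eq (cs : List String) :
    (cs.foldl (fun (st : List String × String) s => (st.1 ++ [st.2 ++ s], st.2 ++ s)) ([""], "")).1
      = pvPrefixes cs := by
  rw [pv_prefix_fold]
  simp only [pvPrefixes, List.range_succ_eq_map, List.map_cons, List.map_map]
  have h0 : pvPref cs 0 = "" := by simp [pvPref, pvCat_nil]
  rw [h0]
  simp only [List.singleton_append, List.cons.injEq]
  refine ⟨by trivial, List.map_congr_left ?_⟩
  intro k _
  simp [pvPref, String.empty_append, Function.comp, Nat.succ_eq_add_one]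

lemma pv_bucket_getD (prefixes : List String) (key : String) :
    (((PySem.List.enumerate prefixes).foldl
        (fun d jp => d.modify jp.2 [] (fun l => l ++ [jp.1])) PySem.Dict.empty).getD key [])
      = (PySem.List.pyRange 0 (PySem.List.len prefixes) 1).filter
          (fun j => PySem.List.pyGetD prefixes j "" == key) := by
  have h := PySem.Dict.getD_foldl_modify_append
    (l := (PySem.List.pyRange 0 (PySem.List.len prefixes) 1).map
      (fun j => (PySem.List.pyGetD prefixes j "", j)))
    (d := PySem.Dict.empty) (c := key)
  rw [List.foldl_map] at h
  simp only [PySem.Dict.getD_empty, List.nil_append] at h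
  rw [PySem.List.enumerate_eq_map_pyRange prefixes "", List.foldl_map]
  rw [h, List.filter_map, List.map_map]
  simp [Function.comp_def, PySem.List.len_eq]

lemma pv_range_filter_window (P : Int → Bool) (a b c : Int) (h0 : 0 ≤ a) (hac : a ≤ c)
    (hbc : b ≤ c) :
    ((PySem.List.pyRange 0 c 1).filter P).filter (fun j => decide (a ≤ j ∧ j < b))
      = (PySem.List.pyRange a b 1).filter P := by
  rw [List.filter_filter]
  by_cases hba : b ≤ a
  · rw [PySem.List.pyRange_one_eq_nil hba, List.filter_nil, List.filter_eq_nil_iff]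
    intro j hj hcon
    simp only [Bool.and_eq_true, decide_eq_true_eq] at hcon
    omega
  · rw [PySem.List.pyRange_one_append 0 a c h0 hac, List.filter_append,
      PySem.List.pyRange_one_append a b c (by omega) hbc, List.filter_append]
    have h1 : (PySem.List.pyRange 0 a 1).filter
        (fun j => decide (a ≤ j ∧ j < b) && P j) = [] := by
      rw [List.filter_eq_nil_iff]
      intro j hj hcon
      rw [PySem.List.mem_pyRange_one] at hj
      simp only [Bool.and_eq_true, decide_eq_true_eq] at hcon
      omega
    have h3 : (PySem.List.pyRange b c 1).filter
        (fun j => decide (a ≤ j ∧ j < b) && P j) = [] := by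
      rw [List.filter_eq_nil_iff]
      intro j hj hcon
      rw [PySem.List.mem_pyRange_one] at hj
      simp only [Bool.and_eq_true, decide_eq_true_eq] at hcon
      omega
    have h2 : (PySem.List.pyRange a b 1).filter
        (fun j => decide (a ≤ j ∧ j < b) && P j) = (PySem.List.pyRange a b 1).filter P := by
      apply List.filter_congr
      intro j hj
      rw [PySem.List.mem_pyRange_one] at hj
      rw [decide_eq_true (show a ≤ j ∧ j < b by omega), Bool.true_and]
    rw [h1, h2, h3]
    simp

lemma pv_len_prefixes (cs : List String) :
    PySem.List.len (pvPrefixes cs) = (cs.length : Int) + 1 := by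
  simp [PySem.List.len_eq, pvPrefixes]

lemma pv_getD_prefixes (cs : List String) {i : Int} (h0 : 0 ≤ i)
    (hn : i < (cs.length : Int) + 1) :
    PySem.List.pyGetD (pvPrefixes cs) i "" = pvPref cs i.toNat := by
  rw [PySem.List.pyGetD_of_nonneg _ _ h0]
  unfold pvPrefixes
  rw [List.getD_eq_getElem?_getD]
  have hlt : i.toNat < cs.length + 1 := by omega
  simp [hlt]

lemma pv_per_i (cs : List String) (tgt : String) (depth : Int) {i : Int} (h0 : 0 ≤ i)
    (hn : i < (cs.length : Int)) :
    ((PySem.List.pyRange (i + 1) (min ((cs.length : Int)) (i + depth)) 1).filter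
        (fun j => PySem.Str.join "" (PySem.List.slice cs (some i) (some j)) == tgt))
      = (((PySem.List.pyRange 0 (PySem.List.len (pvPrefixes cs)) 1).filter
            (fun j => PySem.List.pyGetD (pvPrefixes cs) j ""
              == PySem.List.pyGetD (pvPrefixes cs) i "" ++ tgt)).filter
          (fun j => decide (i < j ∧ j < min ((cs.length : Int)) (i + depth)))) := by
  have hm : min ((cs.length : Int)) (i + depth) ≤ (cs.length : Int) := min_le_left _ _
  have hkey : PySem.List.pyGetD (pvPrefixes cs) i "" = pvPref cs i.toNat :=
    pv_getD_prefixes cs h0 (by omega)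
  rw [hkey, pv_len_prefixes]
  have hwin : ((PySem.List.pyRange 0 ((cs.length : Int) + 1) 1).filter
        (fun j => PySem.List.pyGetD (pvPrefixes cs) j "" == pvPref cs i.toNat ++ tgt)).filter
          (fun j => decide (i < j ∧ j < min ((cs.length : Int)) (i + depth)))
      = ((PySem.List.pyRange 0 ((cs.length : Int) + 1) 1).filter
        (fun j => PySem.List.pyGetD (pvPrefixes cs) j "" == pvPref cs i.toNat ++ tgt)).filter
          (fun j => decide (i + 1 ≤ j ∧ j < min ((cs.length : Int)) (i + depth))) := by
    apply List.filter_congr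
    intro j _
    simp only [decide_eq_decide]
    omega
  rw [hwin, pv_range_filter_window _ _ _ _ (by omega) (by omega) (by omega)]
  apply List.filter_congr
  intro j hj
  rw [PySem.List.mem_pyRange_one] at hj
  have hgd : PySem.List.pyGetD (pvPrefixes cs) j "" = pvPref cs j.toNat :=
    pv_getD_prefixes cs (by omega) (by omega)
  rw [hgd]
  exact pv_cond_eq cs tgt h0 (by omega)

lemma pv_main (cs : List String) (tgt : String) (depth : Int) :
    (PySem.List.pyRange 0 (PySem.List.len cs) 1).foldl (fun acc i =>
      (PySem.List.pyRange (i + 1) (min (PySem.List.len cs) (i + depth)) 1).foldl (fun acc2 j =>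
        if PySem.Str.join "" (PySem.List.slice cs (some i) (some j)) == tgt then acc2 ++ [[i, j]]
        else acc2) acc) ([] : List (List Int))
    = (PySem.List.pyRange 0 (PySem.List.len cs) 1).foldl (fun acc i =>
        (((PySem.List.enumerate ((cs.foldl (fun (st : List String × String) s => (st.1 ++ [st.2 ++ s], st.2 ++ s))
              ([""], "")).1)).foldl
            (fun d jp => d.modify jp.2 [] (fun l => l ++ [jp.1])) PySem.Dict.empty).getD
          (PySem.List.pyGetD
            ((cs.foldl (fun (st : List String × String) s => (st.1 ++ [st.2 ++ s], st.2 ++ s))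
              ([""], "")).1) i "" ++ tgt) []).foldl
          (fun acc2 j => if i < j ∧ j < min (PySem.List.len cs) (i + depth) then acc2 ++ [[i, j]]
            else acc2) acc) ([] : List (List Int)) := by
  rw [pv_prefixes_eq]
  have hA : ∀ (acc : List (List Int)), ∀ i ∈ PySem.List.pyRange 0 (PySem.List.len cs) 1,
      (PySem.List.pyRange (i + 1) (min (PySem.List.len cs) (i + depth)) 1).foldl (fun acc2 j =>
        if PySem.Str.join "" (PySem.List.slice cs (some i) (some j)) == tgt then acc2 ++ [[i, j]]
        else acc2) acc
      = acc ++ ((PySem.List.pyRange (i + 1) (min (PySem.List.len cs) (i + depth)) 1).filter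
          (fun j => PySem.Str.join "" (PySem.List.slice cs (some i) (some j)) == tgt)).map
            (fun j => [i, j]) := by
    intro acc i _
    exact PySem.List.foldl_append_if _ _ _ _
  have hB : ∀ (acc : List (List Int)), ∀ i ∈ PySem.List.pyRange 0 (PySem.List.len cs) 1,
      (((PySem.List.enumerate (pvPrefixes cs)).foldl
          (fun d jp => d.modify jp.2 [] (fun l => l ++ [jp.1])) PySem.Dict.empty).getD
        (PySem.List.pyGetD (pvPrefixes cs) i "" ++ tgt) []).foldl
        (fun acc2 j => if i < j ∧ j < min (PySem.List.len cs) (i + depth) then acc2 ++ [[i, j]]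
          else acc2) acc
      = acc ++ ((PySem.List.pyRange (i + 1) (min (PySem.List.len cs) (i + depth)) 1).filter
          (fun j => PySem.Str.join "" (PySem.List.slice cs (some i) (some j)) == tgt)).map
            (fun j => [i, j]) := by
    intro acc i hi
    rw [PySem.List.mem_pyRange_one, PySem.List.len_eq] at hi
    rw [pv_bucket_getD,
      PySem.List.foldl_append_ite (p := fun j => i < j ∧ j < min (PySem.List.len cs) (i + depth))
        (f := fun j => [i, j])]
    congr 1
    simp only [PySem.List.len_eq]
    rw [pv_per_i cs tgt depth (by omega) (by omega)]
    simp only [PySem.List.len_eq]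
    congr 1
  rw [PySem.List.foldl_congr_mem _ _ _ _ hA, PySem.List.foldl_congr_mem _ _ _ _ hB]

-- ===== VERDICT (by name: the statement is the Claim_ definition above) =====
theorem find_subsequences_that_concatenate_to_target_string_spec : Claim_equal_find_subsequences_that_concatenate_to_target_string := by
  intro sequence target depth _
  unfold Spec_find_subsequences_that_concatenate_to_target_string
    find_subsequences_that_concatenate_to_target_string
    find_subsequences_that_concatenate_to_target_string_alt
  exact pv_main (sequence.map (fun s => PySem.Str.replace s " " ""))
    (PySem.Str.replace target " " "") depth
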